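-- pv_equiv track=rewrite | github.com/jphacks/D_2109 | backend_regex/group_sort_impot.py | sort_import
-- ===== SOURCE A (Python) =====
-- comment = ['# [trim] Info: グルーピング済みです',
--            '# [trim] Info: アルファベットソート済みです'
--           ]
--
-- def sort_import(lines):
--     # 3groupに分割なし + アルファベット順にソート
--
--     import_lines = [line for line in lines if (line.startswith('import'))]
--     from_lines = [line for line in lines if (line.startswith('from'))]
--     not_import_lines = [
--         line for line in lines if not (
--             (line.startswith('import')) or (
--                 line.startswith('from')))]
--
--     import_from_lines = sorted(import_lines) + ['']
--     sorted_lines = comment + import_from_lines + not_import_lines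
--
--     return sorted_lines
-- ===== SOURCE B (Python) =====
-- comment = ['# [trim] Info: グルーピング済みです',
--            '# [trim] Info: アルファベットソート済みです'
--           ]
--
-- def sort_import(lines):
--     # One pass; import lines are kept sorted incrementally by insertion
--     # (no call to sorted), 'from' lines are dropped as in the original.
--     imports = []
--     others = []
--     for line in lines:
--         if line.startswith('import'):
--             i = 0
--             while i < len(imports) and imports[i] <= line:
--                 i += 1
--             imports.insert(i, line)
--         elif line.startswith('from'):
--             pass  # dropped, as in the original
--         else:
--             others.append(line)
--     return comment + imports + [''] + others
-- ===== Notes on version B (the rewrite author's own statement) =====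
-- stated objective: alternative
-- what changed: Replaced the three filtering comprehensions plus a call to sorted() by a single pass that classifies each line and keeps the import group sorted incrementally with an explicit insertion (insert after equal keys, matching sorted's stability); 'from' lines are dropped as in A, and the result is the comment header, the sorted imports, an empty-string separator, then the remaining lines.
import Mathlib
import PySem

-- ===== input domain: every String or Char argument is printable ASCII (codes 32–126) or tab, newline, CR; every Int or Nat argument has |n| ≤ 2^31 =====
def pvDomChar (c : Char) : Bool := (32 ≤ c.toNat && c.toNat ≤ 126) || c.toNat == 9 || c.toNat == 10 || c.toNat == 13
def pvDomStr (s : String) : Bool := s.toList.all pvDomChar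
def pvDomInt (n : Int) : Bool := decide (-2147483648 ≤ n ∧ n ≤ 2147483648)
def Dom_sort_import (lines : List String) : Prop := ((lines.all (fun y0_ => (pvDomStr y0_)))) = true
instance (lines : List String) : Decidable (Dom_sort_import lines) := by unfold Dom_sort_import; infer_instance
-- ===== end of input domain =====

-- B replaces A's three filtering comprehensions + library sort by a single pass that
-- keeps the import lines sorted incrementally by insertion; objective: alternative.

-- ===== PORT A =====
def pvComment : List String := ["# [trim] Info: グルーピング済みです",
                                "# [trim] Info: アルファベットソート済みです"]

def sort_import (lines : List String) : List String :=
  let import_lines := lines.filter (fun line => PySem.Str.startswith line "import")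
  let _from_lines := lines.filter (fun line => PySem.Str.startswith line "from")
  let not_import_lines := lines.filter
    (fun line => !(PySem.Str.startswith line "import" || PySem.Str.startswith line "from"))
  let import_from_lines := PySem.List.sorted import_lines (fun x => x) false ++ [""]
  pvComment ++ import_from_lines ++ not_import_lines

-- ===== PORT B =====
-- the inner while/insert loop of Source B: walk past the elements ≤ line, insert there
def pvInsort (l : List String) (x : String) : List String :=
  match l with
  | [] => [x]
  | y :: ys => if y ≤ x then y :: pvInsort ys x else x :: y :: ys

def sort_import_alt (lines : List String) : List String :=
  let acc := lines.foldl
    (fun (acc : List String × List String) line =>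
      if PySem.Str.startswith line "import" then (pvInsort acc.1 line, acc.2)
      else if PySem.Str.startswith line "from" then acc
      else (acc.1, acc.2 ++ [line]))
    ([], [])
  pvComment ++ acc.1 ++ [""] ++ acc.2

-- ===== PRECONDITION & SPEC =====
def Spec_sort_import (lines : List String) (out : List String) : Prop := out = sort_import_alt lines
instance (lines : List String) (out : List String) : Decidable (Spec_sort_import lines out) := by unfold Spec_sort_import; infer_instance

-- ===== CLAIM (what is proved, stated in full; the proofs are below) =====
def Claim_equal_sort_import : Prop := ∀ (lines : List String), Dom_sort_import lines → Spec_sort_import lines (sort_import lines)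

-- ===== LEMMAS AND PROOFS =====
theorem pvInsort_eq_insertBy (l : List String) (x : String) :
    pvInsort l x = PySem.List.insertBy (fun a b => decide (a < b)) x l := by
  induction l with
  | nil => rfl
  | cons y ys ih =>
    simp only [pvInsort, PySem.List.insertBy, ih]
    by_cases h : y ≤ x
    · rw [if_pos h, if_neg (by simpa using not_lt.mpr h)]
    · rw [if_neg h, if_pos (by simpa using not_le.mp h)]

theorem pv_fold_spec (p q : String → Bool) (lines : List String) (a b : List String) :
    lines.foldl
      (fun (acc : List String × List String) line =>
        if p line then (pvInsort acc.1 line, acc.2)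
        else if q line then acc
        else (acc.1, acc.2 ++ [line]))
      (a, b)
    = ((lines.filter p).foldl pvInsort a,
       b ++ lines.filter (fun line => !(p line || q line))) := by
  induction lines generalizing a b with
  | nil => simp
  | cons x xs ih =>
    simp only [List.foldl_cons, List.filter_cons]
    split_ifs <;> simp_all

theorem pv_foldl_insort_eq (l acc : List String) :
    l.foldl pvInsort acc
      = l.foldl (fun acc x => PySem.List.insertBy (fun a b => decide (a < b)) x acc) acc := by
  induction l generalizing acc with
  | nil => rfl
  | cons x xs ih => simp only [List.foldl_cons, ih, pvInsort_eq_insertBy]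

-- ===== VERDICT (by name: the statement is the Claim_ definition above) =====
theorem sort_import_spec : Claim_equal_sort_import := by
  intro lines _
  show sort_import lines = sort_import_alt lines
  simp only [sort_import, sort_import_alt]
  rw [pv_fold_spec, PySem.List.sorted_eq_foldl_insertBy, ← pv_foldl_insort_eq]
  simp [List.append_assoc]
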